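-- pv_equiv track=rewrite | github.com/posl/comment_recommendation | script/split_gen/3_time/zh/147_C/6.py | get_honest_person_count
-- ===== SOURCE A (Python) =====
-- def get_honest_person_count(N, A, xy):
--     honest_person_count = 0
--     for i in range(2**N):
--         honest_person = []
--         for j in range(N):
--             if ((i >> j) & 1):
--                 honest_person.append(j + 1)
--         if len(honest_person) <= honest_person_count:
--             continue
--         for k in range(len(honest_person)):
--             for l in range(A[honest_person[k] - 1]):
--                 if xy[honest_person[k] - 1][l][1] == 0 and xy[honest_person[k] - 1][l][0] in honest_person:
--                     break
--             else:
--                 if k == len(honest_person) - 1: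
--                     honest_person_count = len(honest_person)
--                     break
--                 else:
--                     continue
--             break
--     return honest_person_count
-- ===== SOURCE B (Python) =====
-- def _unkind_mask(N, A, xy, p):
--     # bitmask of the people that person p+1 calls unkind (y == 0 testimonies only,
--     # mirroring A, which never checks the y == 1 direction)
--     m = 0
--     for l in range(A[p]):
--         t = xy[p][l]
--         if t[1] == 0 and 1 <= t[0] <= N:
--             m |= 1 << (t[0] - 1)
--     return m
--
--
-- def get_honest_person_count(N, A, xy):
--     unkind = [_unkind_mask(N, A, xy, p) for p in range(N)]
--     # DP popcount table: pc[m] = number of set bits of m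
--     pc = [0]
--     for mask in range(1, 1 << N):
--         pc.append(pc[mask >> 1] + (mask & 1))
--     best = 0
--     for mask in range(1 << N):
--         size = pc[mask]
--         if best < size and all(unkind[j] & mask == 0 for j in range(N) if (mask >> j) & 1):
--             best = size
--     return best
-- ===== Notes on version B (the rewrite author's own statement) =====
-- stated objective: alternative
-- what changed: B precomputes one 'unkind' bitmask per person from the y==0 testimonies and a DP popcount table pc[m]=pc[m>>1]+(m&1), then judges each candidate mask by a table lookup plus (only when it could improve the best) a pure bitwise test unkind[j] & mask == 0 — eliminating A's per-mask rebuilding of the honest-person list and its nested per-person re-scan of testimonies with for/else/break control flow.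
-- outside the precondition, e.g. on get_honest_person_count(2, [1], [[[2, 0]]]): A returns 1, B raises IndexError
import Mathlib
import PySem

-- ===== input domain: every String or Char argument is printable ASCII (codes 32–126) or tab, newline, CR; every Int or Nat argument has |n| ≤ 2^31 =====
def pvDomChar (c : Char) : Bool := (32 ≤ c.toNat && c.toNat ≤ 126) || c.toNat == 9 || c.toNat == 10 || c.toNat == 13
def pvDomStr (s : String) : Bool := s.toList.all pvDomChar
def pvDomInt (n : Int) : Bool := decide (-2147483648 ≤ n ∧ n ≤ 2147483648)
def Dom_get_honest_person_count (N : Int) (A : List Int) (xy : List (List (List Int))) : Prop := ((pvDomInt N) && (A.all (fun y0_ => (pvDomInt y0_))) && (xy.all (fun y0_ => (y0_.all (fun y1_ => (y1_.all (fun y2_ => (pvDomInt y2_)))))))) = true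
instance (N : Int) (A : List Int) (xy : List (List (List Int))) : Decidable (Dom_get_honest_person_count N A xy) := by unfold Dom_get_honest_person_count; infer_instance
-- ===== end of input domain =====

-- B replaces A's per-mask honest-list rebuild and nested testimony re-scan (for/else/break)
-- by precomputed per-person 'unkind' bitmasks and pure bitwise per-mask tests (alternative decomposition).


-- ===== PORT A =====
-- shared primitive: Python's '(i >> j) & 1' bit test (exact here: both ports only call it with 0 ≤ j)
def pvShr (i j : Int) : Int := i >>> j.toNat
def pvBit (i j : Int) : Bool := PySem.Int.band (pvShr i j) 1 != 0

-- the inner 'for l in range(A[p-1]): … break / else' loop: true iff the break fires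
def pvAInnerBreak (row : List (List Int)) (hp : List Int) : List Int → Bool
  | [] => false
  | l :: ls =>
    let t := PySem.List.pyGetD row l []
    if (PySem.List.pyGetD t 1 0 == 0) && hp.contains (PySem.List.pyGetD t 0 0) then true
    else pvAInnerBreak row hp ls

-- the outer 'for k in range(len(honest_person))' loop with its break / for-else / continue
def pvAKLoop (A : List Int) (xy : List (List (List Int))) (hp : List Int) (best : Int) :
    List Int → Int
  | [] => best
  | k :: ks =>
    let p := PySem.List.pyGetD hp k 0
    if pvAInnerBreak (PySem.List.pyGetD xy (p - 1) []) hp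
        (PySem.List.pyRange 0 (PySem.List.pyGetD A (p - 1) 0)) then best
    else if k == (hp.length : Int) - 1 then (hp.length : Int)
    else pvAKLoop A xy hp best ks

def get_honest_person_count (N : Int) (A : List Int) (xy : List (List (List Int))) : Int :=
  (PySem.List.pyRange 0 ((2 : Int) ^ N.toNat)).foldl (fun best i =>
    -- honest_person = [j+1 for j in range(N) if (i >> j) & 1]
    let hp := (PySem.List.pyRange 0 N).foldl
      (fun acc j => if pvBit i j then acc ++ [j + 1] else acc) []
    if (hp.length : Int) ≤ best then best
    else pvAKLoop A xy hp best (PySem.List.pyRange 0 (hp.length : Int))) 0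

-- ===== PORT B =====
-- _unkind_mask: bitmask of the people that person p+1 calls unkind (y == 0 testimonies only; 1 ≤ x, so (x-1).toNat is exact)
def pvUnkindMask (N : Int) (A : List Int) (xy : List (List (List Int))) (p : Int) : Int :=
  (PySem.List.pyRange 0 (PySem.List.pyGetD A p 0)).foldl (fun m l =>
    let t := PySem.List.pyGetD (PySem.List.pyGetD xy p []) l []
    let x := PySem.List.pyGetD t 0 0
    if (PySem.List.pyGetD t 1 0 == 0) && (1 ≤ x && x ≤ N) then
      PySem.Int.bor m ((1 : Int) <<< (x - 1).toNat)
    else m) 0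

def get_honest_person_count_alt (N : Int) (A : List Int) (xy : List (List (List Int))) : Int :=
  let unkind := (PySem.List.pyRange 0 N).map (fun p => pvUnkindMask N A xy p)
  -- DP popcount table: pc[m] = pc[m >> 1] + (m & 1)
  let pc := (PySem.List.pyRange 1 ((1 : Int) <<< N.toNat)).foldl
      (fun pc mask => pc ++ [PySem.List.pyGetD pc (pvShr mask 1) 0 + PySem.Int.band mask 1]) [0]
  (PySem.List.pyRange 0 ((1 : Int) <<< N.toNat)).foldl (fun (best mask : Int) =>
    let size := PySem.List.pyGetD pc mask 0
    -- 'best < size and all(...)': Python's short-circuit 'and' as nested ifs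
    if best < size then
      if (PySem.List.pyRange 0 N).all (fun j =>
          !(pvBit mask j) ||
          (PySem.Int.band (PySem.List.pyGetD unkind j 0) mask == 0)) then size
      else best
    else best) 0

-- ===== PRECONDITION & SPEC =====
-- Pre_ = the inputs where Python A returns normally: N ≥ 0 (2**N is integral), the arrays cover all
-- N people, each declared testimony count fits its row and each read testimony has both entries.
-- (On shorter arrays A usually raises IndexError, though pruning can let it return by accident.)
def Pre_get_honest_person_count (N : Int) (A : List Int) (xy : List (List (List Int))) : Prop :=
  0 ≤ N ∧ N ≤ (A.length : Int) ∧ N ≤ (xy.length : Int) ∧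
  ∀ p ∈ List.range N.toNat,
    (A.getD p 0) ≤ ((xy.getD p []).length : Int) ∧
    ∀ t ∈ (xy.getD p []).take (A.getD p 0).toNat, 2 ≤ t.length
instance (N : Int) (A : List Int) (xy : List (List (List Int))) : Decidable (Pre_get_honest_person_count N A xy) := by unfold Pre_get_honest_person_count; infer_instance

def pvWitness_get_honest_person_count : Int × List Int × List (List (List Int)) :=
  (1, [1], [[[1, 1]]])

def Spec_get_honest_person_count (N : Int) (A : List Int) (xy : List (List (List Int))) (out : Int) : Prop := out = get_honest_person_count_alt N A xy
instance (N : Int) (A : List Int) (xy : List (List (List Int))) (out : Int) : Decidable (Spec_get_honest_person_count N A xy out) := by unfold Spec_get_honest_person_count; infer_instance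

-- ===== CLAIM (what is proved, stated in full; the proofs are below) =====
def Claim_equal_get_honest_person_count : Prop := ∀ (N : Int) (A : List Int) (xy : List (List (List Int))), Dom_get_honest_person_count N A xy → Pre_get_honest_person_count N A xy → Spec_get_honest_person_count N A xy (get_honest_person_count N A xy)

-- ===== LEMMAS AND PROOFS =====

-- the honest_person list A builds for mask i
def pvHP (N i : Int) : List Int :=
  ((PySem.List.pyRange 0 N).filter (fun j => pvBit i j)).map (fun j => j + 1)

-- 'person p survives A's inner testimony scan'
def pvOKb (A : List Int) (xy : List (List (List Int))) (hp : List Int) (p : Int) : Bool :=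
  !(pvAInnerBreak (PySem.List.pyGetD xy (p - 1) []) hp
      (PySem.List.pyRange 0 (PySem.List.pyGetD A (p - 1) 0)))

lemma pvAllCongrMem {α : Type} (l : List α) (p q : α → Bool)
    (h : ∀ x ∈ l, p x = q x) : l.all p = l.all q := by
  induction l with
  | nil => rfl
  | cons x xs ih =>
    simp only [List.all_cons, h x (by simp),
      ih (fun y hy => h y (List.mem_cons_of_mem _ hy))]

lemma pvFoldlInvCongr {α β : Type} (P : β → Prop) (f g : β → α → β) (l : List α) (init : β)
    (h0 : P init) (hfg : ∀ acc x, P acc → x ∈ l → f acc x = g acc x ∧ P (f acc x)) :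
    l.foldl f init = l.foldl g init := by
  induction l generalizing init with
  | nil => rfl
  | cons x xs ih =>
    obtain ⟨hfx, hPfx⟩ := hfg init x h0 (by simp)
    rw [List.foldl_cons, List.foldl_cons, hfx]
    exact ih (g init x) (hfx ▸ hPfx)
      (fun acc y hacc hy => hfg acc y hacc (List.mem_cons_of_mem _ hy))

lemma pvAInner_any (row : List (List Int)) (hp : List Int) (ls : List Int) :
    pvAInnerBreak row hp ls = ls.any (fun l =>
      (PySem.List.pyGetD (PySem.List.pyGetD row l []) 1 0 == 0) &&
      hp.contains (PySem.List.pyGetD (PySem.List.pyGetD row l []) 0 0)) := by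
  induction ls with
  | nil => rfl
  | cons l ls ih =>
    simp only [pvAInnerBreak, List.any_cons, ← ih]
    by_cases h : ((PySem.List.pyGetD (PySem.List.pyGetD row l []) 1 0 == 0) &&
      hp.contains (PySem.List.pyGetD (PySem.List.pyGetD row l []) 0 0)) = true <;>
      simp [beq_eq_decide, h]

lemma pvNatAndZero (x z : Nat) : x &&& z = 0 ↔ ∀ i, (x.testBit i && z.testBit i) = false := by
  constructor
  · intro h i
    have := congrArg (fun n => n.testBit i) h
    simpa [Nat.testBit_land, Nat.zero_testBit] using this
  · intro h
    apply Nat.eq_of_testBit_eq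
    intro i
    simpa [Nat.testBit_land, Nat.zero_testBit] using h i

lemma pvBandBorZero (a b c : Int) (ha : 0 ≤ a) (hb : 0 ≤ b) (hc : 0 ≤ c) :
    PySem.Int.band (PySem.Int.bor a b) c = 0 ↔
      PySem.Int.band a c = 0 ∧ PySem.Int.band b c = 0 := by
  rw [PySem.Int.bor_of_nonneg ha hb,
    PySem.Int.band_of_nonneg (by positivity) hc,
    PySem.Int.band_of_nonneg ha hc, PySem.Int.band_of_nonneg hb hc]
  have h1 : (a.toNat ||| b.toNat) &&& c.toNat = 0 ↔
      a.toNat &&& c.toNat = 0 ∧ b.toNat &&& c.toNat = 0 := by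
    simp only [pvNatAndZero, Nat.testBit_or]
    constructor
    · intro h
      constructor <;> intro i <;> have := h i <;>
        cases hx : a.toNat.testBit i <;> cases hy : b.toNat.testBit i <;>
        cases hz : c.toNat.testBit i <;> simp_all
    · intro ⟨h1, h2⟩ i
      have := h1 i; have := h2 i
      cases hx : a.toNat.testBit i <;> cases hy : b.toNat.testBit i <;>
        cases hz : c.toNat.testBit i <;> simp_all
  constructor
  · intro h
    have := h1.mp (by exact_mod_cast h)
    exact ⟨by exact_mod_cast this.1, by exact_mod_cast this.2⟩
  · intro ⟨u, v⟩
    have := h1.mpr ⟨by exact_mod_cast u, by exact_mod_cast v⟩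
    exact_mod_cast this

lemma pvShiftNonneg (k : Nat) : (0 : Int) ≤ (1 : Int) <<< k := by
  rw [Int.shiftLeft_eq]; positivity

lemma pvBandFold (cond : Int → Bool) (key : Int → Int) (ls : List Int) (m0 i : Int)
    (h0 : 0 ≤ m0) (hi : 0 ≤ i) :
    (PySem.Int.band
      (ls.foldl (fun m l => if cond l then PySem.Int.bor m ((1 : Int) <<< (key l - 1).toNat) else m) m0) i = 0)
    ↔ (PySem.Int.band m0 i = 0 ∧
        ∀ l ∈ ls, cond l = true → PySem.Int.band ((1 : Int) <<< (key l - 1).toNat) i = 0) := by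
  induction ls generalizing m0 with
  | nil => simp
  | cons l ls ih =>
    rw [List.foldl_cons]
    cases hc : cond l
    · rw [if_neg (by simp)]
      rw [ih _ h0]
      constructor
      · rintro ⟨u, w⟩
        refine ⟨u, ?_⟩
        intro l' hl' hcl'
        rcases List.mem_cons.mp hl' with rfl | hl'
        · rw [hc] at hcl'; cases hcl'
        · exact w l' hl' hcl'
      · rintro ⟨u, w⟩
        exact ⟨u, fun l' hl' hcl' => w l' (List.mem_cons_of_mem _ hl') hcl'⟩
    · rw [if_pos rfl]
      rw [ih _ (by rw [PySem.Int.bor_of_nonneg h0 (pvShiftNonneg _)]; positivity),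
          pvBandBorZero _ _ _ h0 (pvShiftNonneg _) hi]
      constructor
      · rintro ⟨⟨u, v⟩, w⟩
        refine ⟨u, ?_⟩
        intro l' hl' hcl'
        rcases List.mem_cons.mp hl' with rfl | hl'
        · exact v
        · exact w l' hl' hcl'
      · rintro ⟨u, w⟩
        exact ⟨⟨u, w l (by simp) hc⟩,
          fun l' hl' hcl' => w l' (List.mem_cons_of_mem _ hl') hcl'⟩

-- 'bit k of i is set', read either through (1 << k) & i or (i >> k) & 1
lemma pvBitShift (i k : Int) (hi : 0 ≤ i) (_hk : 0 ≤ k) :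
    (PySem.Int.band ((1 : Int) <<< k.toNat) i = 0) ↔ (PySem.Int.band (pvShr i k) 1 = 0) := by
  obtain ⟨n, rfl⟩ := Int.eq_ofNat_of_zero_le hi
  have h1 : ((1 : Int) <<< k.toNat) = ((1 <<< k.toNat : Nat) : Int) := by
    rw [Int.natCast_shiftLeft]; norm_num
  have h2 : pvShr (n : Int) k = ((n >>> k.toNat : Nat) : Int) := by
    rw [pvShr]; exact (Int.natCast_shiftRight n k.toNat).symm
  have h3 : PySem.Int.band ((n >>> k.toNat : Nat) : Int) 1 = (((n >>> k.toNat) &&& 1 : Nat) : Int) := by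
    exact_mod_cast PySem.Int.band_natCast (n >>> k.toNat) 1
  rw [h1, h2, h3, PySem.Int.band_natCast]
  rw [Nat.one_shiftLeft, Nat.two_pow_and, Nat.and_one_is_mod, Nat.shiftRight_eq_div_pow]
  have ht := Nat.toNat_testBit n k.toNat
  constructor
  · intro h
    rcases Nat.mul_eq_zero.mp (by exact_mod_cast h) with h' | h'
    · exact absurd h' (by positivity)
    · rw [h'] at ht
      have : n / 2 ^ k.toNat % 2 = 0 := by simpa using ht.symm
      exact_mod_cast this
  · intro h
    have h' : n / 2 ^ k.toNat % 2 = 0 := by exact_mod_cast h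
    rw [h'] at ht
    have hb : (n.testBit k.toNat) = false := by
      cases hb : n.testBit k.toNat
      · rfl
      · rw [hb] at ht; simp at ht
    rw [hb]
    simp

-- characterisation of the honest_person list
lemma pvHP_mem (N i x : Int) : x ∈ pvHP N i ↔ 1 ≤ x ∧ x ≤ N ∧ pvBit i (x - 1) = true := by
  simp only [pvHP, List.mem_map, List.mem_filter, PySem.List.mem_pyRange_one]
  constructor
  · rintro ⟨j, ⟨⟨h1, h2⟩, hb⟩, rfl⟩
    refine ⟨by omega, by omega, by simpa using hb⟩
  · rintro ⟨h1, h2, hb⟩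
    exact ⟨x - 1, ⟨⟨by omega, by omega⟩, hb⟩, by ring⟩

-- bitCount recurrence, in shift/band form (0 < m)
lemma pvBitCountRec (m : Int) (hm : 0 < m) :
    ((PySem.Int.bitCount m : Nat) : Int)
      = ((PySem.Int.bitCount (pvShr m 1) : Nat) : Int) + PySem.Int.mod m 2 := by
  have hdiv : pvShr m 1 = PySem.Int.floordiv m 2 := by
    rw [pvShr, PySem.Int.floordiv_eq_ediv_of_pos (by norm_num), Int.shiftRight_eq_div_pow]
    norm_num
  rw [hdiv, PySem.Int.bitCount_of_pos hm]
  have hmod : 0 ≤ PySem.Int.mod m 2 := PySem.Int.mod_nonneg _ (by norm_num)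
  push_cast [Int.toNat_of_nonneg hmod]
  ring

lemma pvRangeShift (n : Nat) :
    PySem.List.pyRange 1 ((n : Int) + 1) = (PySem.List.pyRange 0 (n : Int)).map (fun j => j + 1) := by
  induction n with
  | zero => decide
  | succ m ih =>
    have h1 : PySem.List.pyRange 1 (((m + 1 : Nat) : Int) + 1)
        = PySem.List.pyRange 1 ((m : Int) + 1) ++ [(m : Int) + 1] := by
      push_cast
      exact PySem.List.pyRange_one_succ_right (by omega)
    have h2 : PySem.List.pyRange 0 ((m + 1 : Nat) : Int)
        = PySem.List.pyRange 0 (m : Int) ++ [(m : Int)] := by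
      push_cast
      exact PySem.List.pyRange_one_succ_right (by omega)
    rw [h1, h2, List.map_append, ih]
    simp

lemma pvBitSucc (i j : Int) (hj : 0 ≤ j) : pvBit i (j + 1) = pvBit (pvShr i 1) j := by
  have h : (j + 1).toNat = 1 + j.toNat := by omega
  rw [pvBit, pvBit, pvShr, pvShr, pvShr, h, Int.shiftRight_add]
  rfl

-- low-bit split of the number of set bits among bits 0..n-1 (total popcount when i < 2^n)
lemma pvCountBits : ∀ (n : Nat) (i : Int), 0 ≤ i → i < (2 : Int) ^ n →
    ((List.countP (fun j => pvBit i j) (PySem.List.pyRange 0 (n : Int)) : Nat) : Int)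
      = ((PySem.Int.bitCount i : Nat) : Int) := by
  intro n
  induction n with
  | zero =>
    intro i hi hi2
    norm_num at hi2
    have : i = 0 := by omega
    subst this
    decide
  | succ m ih =>
    intro i hi hi2
    have hdiv : pvShr i 1 = i / 2 := by
      rw [pvShr, Int.shiftRight_eq_div_pow]
      norm_num
    have hcons : PySem.List.pyRange 0 ((m : Int) + 1)
        = 0 :: (PySem.List.pyRange 0 (m : Int)).map (fun j => j + 1) := by
      rw [PySem.List.pyRange_one_cons (by positivity), ← pvRangeShift m]
      congr 1
    push_cast
    rw [hcons, List.countP_cons, List.countP_map]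
    have hshift : List.countP ((fun j => pvBit i j) ∘ fun j => j + 1)
        (PySem.List.pyRange 0 (m : Int))
        = List.countP (fun j => pvBit (pvShr i 1) j) (PySem.List.pyRange 0 (m : Int)) := by
      apply List.countP_congr
      intro j hj
      rw [PySem.List.mem_pyRange_one] at hj
      rw [Function.comp_apply, pvBitSucc i j hj.1]
    have hlow : (if pvBit i 0 = true then (1 : Nat) else 0) = (PySem.Int.mod i 2).toNat := by
      have h0 : pvShr i 0 = i := by
        rw [pvShr]
        exact Int.shiftRight_zero i
      have hmn : 0 ≤ PySem.Int.mod i 2 := PySem.Int.mod_nonneg _ (by norm_num)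
      have hml : PySem.Int.mod i 2 < 2 := PySem.Int.mod_lt _ (by norm_num)
      by_cases hb : pvBit i 0 = true
      · rw [if_pos hb]
        simp only [pvBit, h0, bne_iff_ne, ne_eq] at hb
        rw [PySem.Int.band_one] at hb
        omega
      · rw [if_neg hb]
        simp only [pvBit, h0, bne_iff_ne, ne_eq, not_not] at hb
        rw [PySem.Int.band_one] at hb
        omega
    rw [hshift, hlow]
    by_cases hz : i = 0
    · subst hz
      have hb0 : pvShr (0 : Int) 1 = 0 := by rw [pvShr]; exact Int.zero_shiftRight _
      have hbit0 : ∀ a : Int, pvBit 0 a = false := by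
        intro a
        rw [pvBit, pvShr, Int.zero_shiftRight]
        decide
      have hc : List.countP (fun j => pvBit (0 : Int) j) (PySem.List.pyRange 0 (m : Int)) = 0 := by
        simp [hbit0]
      rw [hb0, hc]
      decide
    · have hpos : 0 < i := by omega
      have hrec := pvBitCountRec i hpos
      have h2 : (2 : Int) ^ (m + 1) = 2 * 2 ^ m := by ring
      rw [h2] at hi2
      have hih := ih (pvShr i 1) (by rw [hdiv]; omega) (by rw [hdiv]; omega)
      have hmn : 0 ≤ PySem.Int.mod i 2 := PySem.Int.mod_nonneg _ (by norm_num)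
      push_cast [Int.toNat_of_nonneg hmn] at hih hrec ⊢
      omega

-- the number of honest people for mask i is the popcount table entry
lemma pvHPLen (N i : Int) (hN : 0 ≤ N) (hi : 0 ≤ i) (hi2 : i < (2 : Int) ^ N.toNat) :
    ((pvHP N i).length : Int) = ((PySem.Int.bitCount i : Nat) : Int) := by
  have hNn : N = (N.toNat : Int) := by omega
  have hlen : (pvHP N i).length
      = List.countP (fun j => pvBit i j) (PySem.List.pyRange 0 N) := by
    rw [pvHP, List.length_map, ← List.countP_eq_length_filter]
  rw [hlen, hNn, pvCountBits N.toNat i hi hi2]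

-- the DP fold builds exactly the popcount table
lemma pvPCTable : ∀ n : Nat,
    (PySem.List.pyRange 1 ((n : Int) + 1)).foldl
      (fun pc mask => pc ++ [PySem.List.pyGetD pc (pvShr mask 1) 0 + PySem.Int.band mask 1]) [0]
    = (PySem.List.pyRange 0 ((n : Int) + 1)).map (fun m => ((PySem.Int.bitCount m : Nat) : Int)) := by
  intro n
  induction n with
  | zero => decide
  | succ m ih =>
    have hm1 : (1 : Int) ≤ (m : Int) + 1 := by omega
    push_cast
    rw [show ((m : Int) + 1 + 1) = ((m : Int) + 1) + 1 from rfl]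
    rw [PySem.List.pyRange_one_succ_right hm1,
      PySem.List.pyRange_one_succ_right (by omega : (0 : Int) ≤ (m : Int) + 1),
      List.foldl_append, List.map_append, ih]
    simp only [List.foldl_cons, List.foldl_nil, List.map_cons, List.map_nil]
    congr 1
    congr 1
    -- the appended entry equals bitCount (m+1)
    have hpos : (0 : Int) < (m : Int) + 1 := by omega
    have hdiv : pvShr ((m : Int) + 1) 1 = ((m : Int) + 1) / 2 := by
      rw [pvShr, Int.shiftRight_eq_div_pow]
      norm_num
    have hget : PySem.List.pyGetD
        ((PySem.List.pyRange 0 ((m : Int) + 1)).map (fun x => ((PySem.Int.bitCount x : Nat) : Int)))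
        (pvShr ((m : Int) + 1) 1) 0 = ((PySem.Int.bitCount (pvShr ((m : Int) + 1) 1) : Nat) : Int) := by
      have hb1 : 0 ≤ pvShr ((m : Int) + 1) 1 := by rw [hdiv]; omega
      have hb2 : pvShr ((m : Int) + 1) 1 < (m : Int) + 1 := by rw [hdiv]; omega
      set sidx := pvShr ((m : Int) + 1) 1 with hs
      have hcast1 : ((m : Int) + 1) = ((m + 1 : Nat) : Int) := by push_cast; ring
      have hcast2 : sidx = ((sidx.toNat : Nat) : Int) := by omega
      rw [hcast1, hcast2, PySem.List.pyGetD_map_pyRange _ _ _ _ (by omega), ← hcast2]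
    rw [hget, PySem.Int.band_one, pvBitCountRec ((m : Int) + 1) hpos]

-- the DP fold, with the 2^n bound it is invoked at
lemma pvPCTablePow (n : Nat) :
    (PySem.List.pyRange 1 ((2 : Int) ^ n)).foldl
      (fun pc mask => pc ++ [PySem.List.pyGetD pc (pvShr mask 1) 0 + PySem.Int.band mask 1]) [0]
    = (PySem.List.pyRange 0 ((2 : Int) ^ n)).map (fun m => ((PySem.Int.bitCount m : Nat) : Int)) := by
  have h1 : 1 ≤ 2 ^ n := Nat.one_le_two_pow
  have h : ((2 : Int) ^ n) = ((2 ^ n - 1 : Nat) : Int) + 1 := by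
    rw [Nat.cast_sub h1]
    push_cast
    ring
  rw [h, pvPCTable]

-- the whole k-loop: returns len(hp) iff the range is nonempty and every indexed person survives
lemma pvAKLoop_eq (A : List Int) (xy : List (List (List Int))) (hp : List Int) (best : Int)
    (n : Nat) : ∀ s : Int, 0 ≤ s → s + (n : Int) = (hp.length : Int) →
    pvAKLoop A xy hp best (PySem.List.pyRange s (hp.length : Int)) =
      if (decide (s < (hp.length : Int)) &&
          (PySem.List.pyRange s (hp.length : Int)).all
            (fun k => pvOKb A xy hp (PySem.List.pyGetD hp k 0))) = true
      then (hp.length : Int) else best := by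
  induction n with
  | zero =>
    intro s hs hlen
    have hnil : PySem.List.pyRange s (hp.length : Int) = [] := by
      rw [List.eq_nil_iff_forall_not_mem]
      intro x hx
      rw [PySem.List.mem_pyRange_one] at hx
      omega
    rw [hnil]
    simp [pvAKLoop, show ¬(s < (hp.length : Int)) by omega]
  | succ m ih =>
    intro s hs hlen
    have hslt : s < (hp.length : Int) := by omega
    rw [PySem.List.pyRange_one_cons hslt]
    simp only [pvAKLoop]
    by_cases hbr : pvAInnerBreak (PySem.List.pyGetD xy (PySem.List.pyGetD hp s 0 - 1) []) hp
        (PySem.List.pyRange 0 (PySem.List.pyGetD A (PySem.List.pyGetD hp s 0 - 1) 0)) = true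
    · rw [if_pos hbr]
      have hfs : pvOKb A xy hp (PySem.List.pyGetD hp s 0) = false := by
        simp [pvOKb, hbr]
      simp [hfs]
    · rw [if_neg hbr]
      have hbr' : pvAInnerBreak (PySem.List.pyGetD xy (PySem.List.pyGetD hp s 0 - 1) []) hp
          (PySem.List.pyRange 0 (PySem.List.pyGetD A (PySem.List.pyGetD hp s 0 - 1) 0)) = false :=
        Bool.eq_false_iff.mpr hbr
      have hOKs : pvOKb A xy hp (PySem.List.pyGetD hp s 0) = true := by
        simp [pvOKb, hbr']
      by_cases hlast : s = (hp.length : Int) - 1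
      · rw [if_pos (beq_iff_eq.mpr hlast)]
        have hnil : PySem.List.pyRange (s + 1) (hp.length : Int) = [] := by
          rw [List.eq_nil_iff_forall_not_mem]
          intro x hx
          rw [PySem.List.mem_pyRange_one] at hx
          omega
        simp [hnil, hOKs, hslt]
      · rw [if_neg (by simpa using hlast)]
        rw [ih (s + 1) (by omega) (by omega)]
        have hs1lt : s + 1 < (hp.length : Int) := by
          rcases lt_or_eq_of_le (by omega : s + 1 ≤ (hp.length : Int)) with h | h
          · exact h
          · exact absurd (by omega : s = (hp.length : Int) - 1) hlast
        by_cases hrest : ((PySem.List.pyRange (s + 1) (hp.length : Int)).all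
            (fun k => pvOKb A xy hp (PySem.List.pyGetD hp k 0))) = true
        · simp [hrest, hOKs, hslt, hs1lt]
        · simp [Bool.eq_false_iff.mpr hrest, hOKs]

-- index-wise all over range(len(hp)) is element-wise all over hp
lemma pvAllIndex (hp : List Int) (f : Int → Bool) :
    (PySem.List.pyRange 0 (hp.length : Int)).all
      (fun k => f (PySem.List.pyGetD hp k 0)) = hp.all f := by
  rcases h : hp.all f with _ | _
  · rw [List.all_eq_false] at h
    rcases h with ⟨x, hx, hfx⟩
    rcases List.mem_iff_getElem.mp hx with ⟨idx, hidx, rfl⟩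
    rw [List.all_eq_false]
    refine ⟨(idx : Int), ?_, ?_⟩
    · rw [PySem.List.mem_pyRange_one]; omega
    · rw [PySem.List.pyGetD_eq_getElem _ _ (by omega) (by exact_mod_cast hidx)]
      simpa using hfx
  · rw [List.all_eq_true] at h
    rw [List.all_eq_true]
    intro k hk
    rw [PySem.List.mem_pyRange_one] at hk
    rw [PySem.List.pyGetD_eq_getElem _ _ hk.1 hk.2]
    exact h _ (by exact List.getElem_mem _)

-- per person: A's inner-scan survival coincides with B's bitmask test
lemma pvPersonBridge (N : Int) (A : List Int) (xy : List (List (List Int))) (i j : Int)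
    (hi : 0 ≤ i) (hj : 0 ≤ j) :
    pvOKb A xy (pvHP N i) (j + 1) = true ↔
      PySem.Int.band (pvUnkindMask N A xy j) i = 0 := by
  have hj1 : j + 1 - 1 = j := by ring
  rw [pvOKb, hj1, Bool.not_eq_true', pvAInner_any, List.any_eq_false]
  rw [pvUnkindMask]
  rw [pvBandFold (fun l =>
        (PySem.List.pyGetD (PySem.List.pyGetD (PySem.List.pyGetD xy j []) l []) 1 0 == 0) &&
        (1 ≤ PySem.List.pyGetD (PySem.List.pyGetD (PySem.List.pyGetD xy j []) l []) 0 0 &&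
         PySem.List.pyGetD (PySem.List.pyGetD (PySem.List.pyGetD xy j []) l []) 0 0 ≤ N))
      (fun l => PySem.List.pyGetD (PySem.List.pyGetD (PySem.List.pyGetD xy j []) l []) 0 0)
      _ _ _ le_rfl hi]
  simp only [PySem.Int.band_comm 0, PySem.Int.band_zero, true_and]
  apply forall_congr'
  intro l
  apply imp_congr_right
  intro _
  set t0 := PySem.List.pyGetD (PySem.List.pyGetD (PySem.List.pyGetD xy j []) l []) 0 0 with ht0
  set t1 := PySem.List.pyGetD (PySem.List.pyGetD (PySem.List.pyGetD xy j []) l []) 1 0 with ht1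
  constructor
  · intro h hc
    simp only [Bool.and_eq_true, beq_iff_eq, decide_eq_true_eq] at hc
    rw [pvBitShift _ _ hi (by omega)]
    simp only [Bool.and_eq_true, beq_iff_eq] at h
    by_contra hne
    apply h
    refine ⟨by simp [hc.1], ?_⟩
    rw [List.contains_iff_mem, pvHP_mem]
    refine ⟨hc.2.1, hc.2.2, ?_⟩
    simp only [pvBit, bne_iff_ne, ne_eq]
    exact hne
  · intro h
    simp only [Bool.and_eq_true, beq_iff_eq, not_and]
    intro h1 hmem
    rw [List.contains_iff_mem, pvHP_mem] at hmem
    have h2 := h (by simp only [Bool.and_eq_true, beq_iff_eq, decide_eq_true_eq]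
                     exact ⟨h1, hmem.1, hmem.2.1⟩)
    rw [pvBitShift _ _ hi (by omega : (0:Int) ≤ t0 - 1)] at h2
    have hb := hmem.2.2
    simp only [pvBit, bne_iff_ne, ne_eq] at hb
    exact hb h2

-- per mask: A's fold step equals B's fold step (for nonnegative accumulator and mask < 2^N)
lemma pvStepEq (N : Int) (A : List Int) (xy : List (List (List Int))) (i best : Int)
    (hN : 0 ≤ N) (hi : 0 ≤ i) (hi2 : i < (2 : Int) ^ N.toNat) (hbest : 0 ≤ best) :
    (let hp := (PySem.List.pyRange 0 N).foldl
        (fun acc j => if pvBit i j then acc ++ [j + 1] else acc) []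
     if (hp.length : Int) ≤ best then best
     else pvAKLoop A xy hp best (PySem.List.pyRange 0 (hp.length : Int))) =
    (let size := PySem.List.pyGetD
        ((PySem.List.pyRange 0 ((2 : Int) ^ N.toNat)).map (fun m => ((PySem.Int.bitCount m : Nat) : Int))) i 0
     if best < size then
       if (PySem.List.pyRange 0 N).all (fun j =>
           !(pvBit i j) ||
           (PySem.Int.band
             (PySem.List.pyGetD ((PySem.List.pyRange 0 N).map (fun p => pvUnkindMask N A xy p)) j 0)
             i == 0)) then size
       else best
     else best) := by
  have hhp : (PySem.List.pyRange 0 N).foldl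
      (fun acc j => if pvBit i j then acc ++ [j + 1] else acc) [] = pvHP N i := by
    rw [PySem.List.foldl_append_if (fun j => pvBit i j) (fun j => j + 1)]
    simp [pvHP]
  have hsize : PySem.List.pyGetD
      ((PySem.List.pyRange 0 ((2 : Int) ^ N.toNat)).map (fun m => ((PySem.Int.bitCount m : Nat) : Int))) i 0
      = ((pvHP N i).length : Int) := by
    have hcast1 : ((2 : Int) ^ N.toNat) = ((2 ^ N.toNat : Nat) : Int) := by push_cast; ring
    have hcast2 : i = ((i.toNat : Nat) : Int) := by omega
    have hi2' : i.toNat < 2 ^ N.toNat := by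
      rw [hcast1] at hi2; omega
    rw [hcast1, hcast2, PySem.List.pyGetD_map_pyRange _ _ _ _ hi2', ← hcast2,
      pvHPLen N i hN hi hi2]
  have hallHP : ∀ f : Int → Bool, (pvHP N i).all f
      = (PySem.List.pyRange 0 N).all (fun j => !(pvBit i j) || f (j + 1)) := by
    intro f
    rw [pvHP, List.all_map, List.all_filter]
    apply pvAllCongrMem
    intro j _
    simp [Function.comp]
  have hall : (PySem.List.pyRange 0 N).all (fun j =>
        !(pvBit i j) ||
        (PySem.Int.band
          (PySem.List.pyGetD ((PySem.List.pyRange 0 N).map (fun p => pvUnkindMask N A xy p)) j 0)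
          i == 0)) = (pvHP N i).all (fun p => pvOKb A xy (pvHP N i) p) := by
    rw [hallHP]
    apply pvAllCongrMem
    intro j hj
    rw [PySem.List.mem_pyRange_one] at hj
    have hj0 : 0 ≤ j := hj.1
    have hjN : j < N := hj.2
    have hget : PySem.List.pyGetD ((PySem.List.pyRange 0 N).map (fun p => pvUnkindMask N A xy p)) j 0
        = pvUnkindMask N A xy j := by
      have hNn : N = (N.toNat : Int) := by omega
      have hjn : j = (j.toNat : Int) := by omega
      rw [hNn, hjn, PySem.List.pyGetD_map_pyRange _ _ _ _ (by omega)]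
    rw [hget]
    have hOK := pvPersonBridge N A xy i j hi hj0
    cases hbit : pvBit i j
    · simp
    · rcases hOK' : pvOKb A xy (pvHP N i) (j + 1) with _ | _
      · have hnz : ¬ PySem.Int.band (pvUnkindMask N A xy j) i = 0 := by
          intro hz
          exact absurd (hOK.mpr hz) (by simp [hOK'])
        simp [hnz]
      · have hz : PySem.Int.band (pvUnkindMask N A xy j) i = 0 := hOK.mp hOK'
        simp [hz]
  simp only [hhp, hsize, hall]
  have hK := pvAKLoop_eq A xy (pvHP N i) best (pvHP N i).length 0 le_rfl (by omega)
  rw [pvAllIndex (pvHP N i) (fun p => pvOKb A xy (pvHP N i) p)] at hK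
  by_cases hle : ((pvHP N i).length : Int) ≤ best
  · rw [if_pos hle, if_neg (by omega)]
  · rw [if_neg hle, if_pos (by omega), hK]
    by_cases hok : (pvHP N i).all (fun p => pvOKb A xy (pvHP N i) p) = true
    · rw [if_pos hok, if_pos]
      simp only [hok, Bool.and_true, decide_eq_true_eq]
      omega
    · rw [if_neg hok, if_neg]
      simp [hok]

-- ===== VERDICT (by name: the statement is the Claim_ definition above) =====
theorem get_honest_person_count_spec : Claim_equal_get_honest_person_count := by
  intro N A xy _ hPre
  unfold Spec_get_honest_person_count get_honest_person_count get_honest_person_count_alt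
  have hN : 0 ≤ N := hPre.1
  have hpow : (1 : Int) <<< N.toNat = (2 : Int) ^ N.toNat := by
    rw [Int.shiftLeft_eq]; ring
  rw [hpow, pvPCTablePow N.toNat]
  apply pvFoldlInvCongr (fun b => 0 ≤ b)
  · exact le_rfl
  · intro acc x hacc hx
    rw [PySem.List.mem_pyRange_one] at hx
    constructor
    · exact pvStepEq N A xy x acc hN hx.1 hx.2 hacc
    · -- A's step keeps the accumulator nonnegative
      show 0 ≤ _
      dsimp only
      generalize (PySem.List.pyRange 0 N).foldl
        (fun acc j => if pvBit x j then acc ++ [j + 1] else acc) ([] : List Int) = hp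
      by_cases hle : ((hp.length : Int)) ≤ acc
      · rw [if_pos hle]; exact hacc
      · rw [if_neg hle]
        rw [pvAKLoop_eq A xy hp acc hp.length 0 le_rfl (by omega)]
        split
        · omega
        · exact hacc
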